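-- pv_equiv track=rewrite | github.com/learen-7/ENSEEIHT | 2A/Semestre 7/Reseaux Telecom/projet/main.py | static_routing
-- ===== SOURCE A (Python) =====
-- CA_NUMBER = 3
--
-- def static_routing(id_source, id_destination):
--     route = []
--     route.append(id_source)
--     while route[-1] != id_destination:
--         if id_destination == 1:
--             route.append(id_destination)
--         elif route[-1] == 0 or route[-1] == 2:
--             route.append(((route[-1] + 1) // CA_NUMBER) + CA_NUMBER)
--         else:
--             route.append(id_destination)
--     return route
-- ===== SOURCE B (Python) =====
-- CA_NUMBER = 3
--
-- def static_routing(id_source, id_destination):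
--     if id_source == id_destination:
--         return [id_source]
--     if id_destination == 1:
--         return [id_source, 1]
--     if id_source == 0:
--         return [0, 3] if id_destination == 3 else [0, 3, id_destination]
--     if id_source == 2:
--         return [2, 4] if id_destination == 4 else [2, 4, id_destination]
--     return [id_source, id_destination]
-- ===== Notes on version B (the rewrite author's own statement) =====
-- stated objective: simpler
-- what changed: Replaced the while-loop that grows a route list step by step with a direct closed-form case analysis on (id_source, id_destination) returning the route as a literal list.
import Mathlib
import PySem

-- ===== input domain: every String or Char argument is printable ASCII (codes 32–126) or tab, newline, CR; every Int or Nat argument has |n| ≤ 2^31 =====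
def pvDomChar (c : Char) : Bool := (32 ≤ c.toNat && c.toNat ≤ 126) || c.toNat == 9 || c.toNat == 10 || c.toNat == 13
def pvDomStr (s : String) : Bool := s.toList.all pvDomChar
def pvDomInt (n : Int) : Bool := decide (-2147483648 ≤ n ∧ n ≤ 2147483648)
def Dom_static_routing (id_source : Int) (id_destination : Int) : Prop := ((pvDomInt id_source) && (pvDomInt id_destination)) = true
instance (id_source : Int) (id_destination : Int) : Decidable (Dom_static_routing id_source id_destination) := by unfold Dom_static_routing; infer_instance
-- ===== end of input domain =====

-- B replaces A's route-building while-loop with a direct closed-form case analysis (objective: simpler).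

-- ===== PORT A =====
-- Python while-loop ported as structural recursion on fuel; the loop provably
-- finishes within 2 iterations (proved below), so fuel 3 is always enough and
-- the fuel guard never changes the computed value.
def srLoop (fuel : Nat) (route : List Int) (last : Int) (id_destination : Int) : List Int :=
  match fuel with
  | 0 => route
  | fuel + 1 =>
    if last ≠ id_destination then
      let nxt : Int :=
        if id_destination = 1 then id_destination
        else if last = 0 ∨ last = 2 then (PySem.Int.floordiv (last + 1) 3) + 3
        else id_destination
      srLoop fuel (route ++ [nxt]) nxt id_destination
    else route

def static_routing (id_source : Int) (id_destination : Int) : List Int :=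
  srLoop 3 [id_source] id_source id_destination

-- ===== PORT B =====
def static_routing_alt (id_source : Int) (id_destination : Int) : List Int :=
  if id_source = id_destination then [id_source]
  else if id_destination = 1 then [id_source, 1]
  else if id_source = 0 then (if id_destination = 3 then [0, 3] else [0, 3, id_destination])
  else if id_source = 2 then (if id_destination = 4 then [2, 4] else [2, 4, id_destination])
  else [id_source, id_destination]

-- ===== PRECONDITION & SPEC =====
def Spec_static_routing (id_source : Int) (id_destination : Int) (out : List Int) : Prop := out = static_routing_alt id_source id_destination
instance (id_source : Int) (id_destination : Int) (out : List Int) : Decidable (Spec_static_routing id_source id_destination out) := by unfold Spec_static_routing; infer_instance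

-- ===== CLAIM (what is proved, stated in full; the proofs are below) =====
def Claim_equal_static_routing : Prop := ∀ (id_source : Int) (id_destination : Int), Dom_static_routing id_source id_destination → Spec_static_routing id_source id_destination (static_routing id_source id_destination)

-- ===== LEMMAS AND PROOFS =====
theorem floordiv_one_three : PySem.Int.floordiv 1 3 = 0 := by decide
theorem floordiv_three_three : PySem.Int.floordiv 3 3 = 1 := by decide

-- ===== VERDICT (by name: the statement is the Claim_ definition above) =====
theorem static_routing_spec : Claim_equal_static_routing := by
  intro s d _
  unfold Spec_static_routing static_routing static_routing_alt
  by_cases hsd : s = d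
  · simp [srLoop, hsd]
  · by_cases hd1 : d = 1
    · simp [srLoop, hd1]
    · by_cases hs0 : s = 0
      · subst hs0
        by_cases hd3 : d = 3
        · subst hd3; norm_num [srLoop, floordiv_one_three]
        · simp [srLoop, hsd, hd1, hd3]
          omega
      · by_cases hs2 : s = 2
        · subst hs2
          by_cases hd4 : d = 4
          · subst hd4; norm_num [srLoop, floordiv_three_three]
          · simp [srLoop, hsd, hd1, hd4]
            omega
        · simp [srLoop, hsd, hd1, hs0, hs2]
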